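-- pv_equiv track=rewrite | github.com/agentculture/zehut | zehut/config.py | _toml_str
-- ===== SOURCE A (Python) =====
-- class ConfigStateError(Exception):
--     """Raised for any config problem routable to EXIT_STATE (65)."""
--
-- _TOML_ESCAPES = {
--     "\\": "\\\\",
--     '"': '\\"',
--     "\n": "\\n",
--     "\r": "\\r",
--     "\t": "\\t",
--     "\b": "\\b",
--     "\f": "\\f",
-- }
--
-- def _toml_str(value: str) -> str:
--     """Escape ``value`` for emission as a TOML basic string (double-quoted).
--
--     TOML basic strings must escape backslash, double quote, and control
--     characters. Without this, a domain or pattern containing ``"`` or ``\\``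
--     would produce invalid TOML and break the next ``load()``.
--     """
--     escaped = value
--     for ch, sub in _TOML_ESCAPES.items():
--         escaped = escaped.replace(ch, sub)
--     # Reject any remaining raw control characters (U+0000..U+001F minus the
--     # ones handled above, plus U+007F). They're technically escapable as
--     # \uXXXX but we have no use case and rejecting is safer.
--     for ch in escaped:
--         if ord(ch) < 0x20 or ord(ch) == 0x7F:
--             raise ConfigStateError(f"value contains unsupported control character U+{ord(ch):04X}")
--     return f'"{escaped}"'
-- ===== SOURCE B (Python) =====
-- class ConfigStateError(Exception):
--     """Raised for any config problem routable to EXIT_STATE (65)."""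
--
-- _TOML_ESCAPES = {
--     "\\": "\\\\",
--     '"': '\\"',
--     "\n": "\\n",
--     "\r": "\\r",
--     "\t": "\\t",
--     "\b": "\\b",
--     "\f": "\\f",
-- }
--
-- def _toml_str(value: str) -> str:
--     """Escape ``value`` for emission as a TOML basic string (double-quoted).
--
--     Single pass: each character is either replaced by its escape sequence,
--     rejected if it is an unescapable control character, or kept as is.
--     """
--     pieces = []
--     for ch in value:
--         sub = _TOML_ESCAPES.get(ch)
--         if sub is not None:
--             pieces.append(sub)
--         elif ord(ch) < 0x20 or ord(ch) == 0x7F: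
--             raise ConfigStateError(f"value contains unsupported control character U+{ord(ch):04X}")
--         else:
--             pieces.append(ch)
--     return '"' + "".join(pieces) + '"'
-- ===== Notes on version B (the rewrite author's own statement) =====
-- stated objective: simpler
-- what changed: B escapes and validates in one pass over the characters (dict lookup per char, join at the end) instead of A's seven sequential str.replace passes followed by a separate control-character scan.
import Mathlib
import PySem

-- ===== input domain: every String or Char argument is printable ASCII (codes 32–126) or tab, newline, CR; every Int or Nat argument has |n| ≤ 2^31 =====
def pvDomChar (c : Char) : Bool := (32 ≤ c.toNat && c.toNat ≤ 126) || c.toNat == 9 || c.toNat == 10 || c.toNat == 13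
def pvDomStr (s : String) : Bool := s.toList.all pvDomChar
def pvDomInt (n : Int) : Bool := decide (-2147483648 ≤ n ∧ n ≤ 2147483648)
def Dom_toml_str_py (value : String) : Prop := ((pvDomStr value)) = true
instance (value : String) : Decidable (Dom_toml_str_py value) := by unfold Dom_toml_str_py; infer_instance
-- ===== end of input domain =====

-- B escapes in a single per-character pass (dict lookup + control check) instead of A's
-- seven str.replace passes plus a separate validation scan; objective: simpler.
-- Inside Dom_toml_str_py neither program raises (tab/newline/CR are escaped, 0x7F is outside Dom).

-- ===== PORT A =====
def tomlEscapes : List (String × String) :=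
  [("\\", "\\\\"), ("\"", "\\\""), ("\n", "\\n"), ("\r", "\\r"), ("\t", "\\t"),
   ("\x08", "\\b"), ("\x0C", "\\f")]

def toml_str_py (value : String) : String :=
  let escaped := tomlEscapes.foldl (fun s p => PySem.Str.replace s p.1 p.2) value
  -- Python raises ConfigStateError if a raw control character remains; that is
  -- unreachable for inputs in Dom_toml_str_py, so the port returns "" there.
  if escaped.toList.any (fun c => decide (c.toNat < 0x20) || c.toNat == 0x7F) then ""
  else "\"" ++ escaped ++ "\""

-- ===== PORT B =====
def tomlEscDict : PySem.Dict Char String :=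
  PySem.Dict.mk [('\\', "\\\\"), ('"', "\\\""), ('\n', "\\n"), ('\r', "\\r"), ('\t', "\\t"),
                 ('\x08', "\\b"), ('\x0C', "\\f")]

-- one loop iteration; `none` state = the Python loop has raised ConfigStateError
def tomlStep (st : Option (List String)) (ch : Char) : Option (List String) :=
  match st with
  | none => none
  | some pieces =>
    match tomlEscDict.get? ch with
    | some sub => some (pieces ++ [sub])
    | none =>
      if ch.toNat < 0x20 ∨ ch.toNat = 0x7F then none  -- raise (unreachable inside Dom)
      else some (pieces ++ [String.ofList [ch]])

def toml_str_py_alt (value : String) : String :=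
  match value.toList.foldl tomlStep (some []) with
  | none => ""  -- Python raises ConfigStateError; unreachable inside Dom
  | some pieces => "\"" ++ PySem.Str.join "" pieces ++ "\""

-- ===== PRECONDITION & SPEC =====
def Spec_toml_str_py (value : String) (out : String) : Prop := out = toml_str_py_alt value
instance (value : String) (out : String) : Decidable (Spec_toml_str_py value out) := by unfold Spec_toml_str_py; infer_instance

-- ===== CLAIM (what is proved, stated in full; the proofs are below) =====
def Claim_equal_toml_str_py : Prop := ∀ (value : String), Dom_toml_str_py value → Spec_toml_str_py value (toml_str_py value)

-- ===== LEMMAS AND PROOFS =====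

-- the per-character escape B performs, as a character-list function
def pieceOf (ch : Char) : String :=
  match tomlEscDict.get? ch with
  | some sub => sub
  | none => String.ofList [ch]

-- single-character str.replace is a flatMap
theorem replace_go_single (o : Char) (new : List Char) :
    ∀ (cs acc : List Char),
      PySem.Chars.replace.go [o] new cs.length cs acc =
        acc.reverse ++ cs.flatMap (fun c => if c = o then new else [c]) := by
  intro cs
  induction cs with
  | nil =>
    intro acc
    simp only [List.length_nil]
    rw [PySem.Chars.replace.go]
    simp
  | cons c cs ih =>
    intro acc
    rw [show (c :: cs).length = cs.length + 1 from rfl, PySem.Chars.replace.go]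
    by_cases h : o = c
    · subst h
      simp only [List.isPrefixOf, BEq.rfl, Bool.true_and, if_pos]
      simp [ih]
    · have hpre : ([o].isPrefixOf (c :: cs)) = false := by
        simp [List.isPrefixOf, h]
      rw [hpre]
      simp only [Bool.false_eq_true, if_false]
      rw [ih]
      have hne : ¬ (c = o) := fun hh => h hh.symm
      simp [hne]

theorem replace_single (o : Char) (new cs : List Char) :
    PySem.Chars.replace cs [o] new = cs.flatMap (fun c => if c = o then new else [c]) := by
  simp [PySem.Chars.replace]
  rw [replace_go_single]
  simp

theorem join_nil_flatten : ∀ xs : List (List Char), PySem.Chars.join [] xs = xs.flatten := by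
  intro xs
  induction xs with
  | nil => simp [pysem]
  | cons a t ih =>
    cases t with
    | nil => simp [pysem]
    | cons b r =>
      rw [PySem.Chars.join_cons_cons]
      simp_all

-- a character the escape dict misses is none of the seven escaped characters
theorem get?_none_facts (c : Char) (hget : tomlEscDict.get? c = none) :
    c ≠ '\\' ∧ c ≠ '"' ∧ c ≠ '\n' ∧ c ≠ '\r' ∧ c ≠ '\t' ∧ c ≠ '\x08' ∧ c ≠ '\x0C' := by
  refine ⟨?_, ?_, ?_, ?_, ?_, ?_, ?_⟩ <;>
    (intro hh; subst hh; exact absurd hget (by decide))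

-- B's loop on a list of in-domain characters never raises and maps pieceOf
theorem foldl_tomlStep (cs : List Char) (h : cs.all pvDomChar = true) :
    ∀ pieces : List String,
      cs.foldl tomlStep (some pieces) = some (pieces ++ cs.map pieceOf) := by
  induction cs with
  | nil => intro pieces; simp
  | cons c cs ih =>
    intro pieces
    simp only [List.all_cons, Bool.and_eq_true] at h
    have hstep : tomlStep (some pieces) c = some (pieces ++ [pieceOf c]) := by
      unfold tomlStep pieceOf
      cases hget : tomlEscDict.get? c with
      | some s => rfl
      | none =>
        obtain ⟨h1, h2, h3, h4, h5, h6, h7⟩ := get?_none_facts c hget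
        have hc := h.1
        simp only [pvDomChar, Bool.or_eq_true, Bool.and_eq_true, decide_eq_true_eq,
                   beq_iff_eq] at hc
        have hn9 : c.toNat ≠ 9 := fun hn => h5 (Char.ext (UInt32.toNat_inj.mp hn))
        have hn10 : c.toNat ≠ 10 := fun hn => h3 (Char.ext (UInt32.toNat_inj.mp hn))
        have hn13 : c.toNat ≠ 13 := fun hn => h4 (Char.ext (UInt32.toNat_inj.mp hn))
        have hnot : ¬ (c.toNat < 32 ∨ c.toNat = 127) := by
          rcases hc with ((⟨ha, hb⟩ | h9) | h10) | h13 <;> omega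
        simp [hnot]
    rw [List.foldl_cons, hstep, ih h.2]
    simp

-- the composite of A's seven single-character replaces equals B's per-character escape
set_option maxRecDepth 8192 in
theorem composite_eq_pieceOf (c : Char) (hc : pvDomChar c = true) :
    ((if c = '\\' then ['\\', '\\'] else [c]).flatMap (fun x =>
      (if x = '"' then ['\\', '"'] else [x]).flatMap (fun x =>
        (if x = '\n' then ['\\', 'n'] else [x]).flatMap (fun x =>
          (if x = '\r' then ['\\', 'r'] else [x]).flatMap (fun x =>
            (if x = '\t' then ['\\', 't'] else [x]).flatMap (fun x =>
              (if x = '\x08' then ['\\', 'b'] else [x]).flatMap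
                (fun x => if x = '\x0C' then ['\\', 'f'] else [x]))))))) =
      (pieceOf c).toList := by
  by_cases h1 : c = '\\'; · subst h1; decide
  by_cases h2 : c = '"'; · subst h2; decide
  by_cases h3 : c = '\n'; · subst h3; decide
  by_cases h4 : c = '\r'; · subst h4; decide
  by_cases h5 : c = '\t'; · subst h5; decide
  by_cases h6 : c = '\x08'; · subst h6; decide
  by_cases h7 : c = '\x0C'; · subst h7; decide
  have hget : tomlEscDict.get? c = none := by
    simp [tomlEscDict, PySem.Dict.get?]
    exact ⟨fun hh => (h1 hh.symm).elim, fun hh => (h2 hh.symm).elim, fun hh => (h3 hh.symm).elim,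
           fun hh => (h4 hh.symm).elim, fun hh => (h5 hh.symm).elim, fun hh => (h6 hh.symm).elim,
           fun hh => (h7 hh.symm).elim⟩
  simp [h1, h2, h3, h4, h5, h6, h7, pieceOf, hget]

-- B's escape pieces contain no control characters
set_option maxRecDepth 8192 in
theorem pieceOf_clean (c : Char) (hc : pvDomChar c = true) :
    ∀ d ∈ (pieceOf c).toList, (decide (d.toNat < 0x20) || d.toNat == 0x7F) = false := by
  cases hget : tomlEscDict.get? c with
  | some s =>
    have : pieceOf c = s := by simp [pieceOf, hget]
    rw [this]
    have hmem : (c, s) ∈ tomlEscDict.items := PySem.Dict.mem_items_of_get?_eq_some _ hget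
    simp only [tomlEscDict, List.mem_cons, List.not_mem_nil, or_false,
               Prod.mk.injEq] at hmem
    rcases hmem with ⟨rfl, rfl⟩ | ⟨rfl, rfl⟩ | ⟨rfl, rfl⟩ | ⟨rfl, rfl⟩ | ⟨rfl, rfl⟩ |
      ⟨rfl, rfl⟩ | ⟨rfl, rfl⟩ <;>
      (intro d hd
       simp only [show ("\\\\" : String).toList = ['\\', '\\'] from rfl,
                  show ("\\\"" : String).toList = ['\\', '\"'] from rfl,
                  show ("\\n" : String).toList = ['\\', 'n'] from rfl,
                  show ("\\r" : String).toList = ['\\', 'r'] from rfl,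
                  show ("\\t" : String).toList = ['\\', 't'] from rfl,
                  show ("\\b" : String).toList = ['\\', 'b'] from rfl,
                  show ("\\f" : String).toList = ['\\', 'f'] from rfl,
                  List.mem_cons, List.not_mem_nil, or_false] at hd
       rcases hd with rfl | rfl <;> decide)
  | none =>
    obtain ⟨h1, h2, h3, h4, h5, h6, h7⟩ := get?_none_facts c hget
    have : pieceOf c = String.ofList [c] := by simp [pieceOf, hget]
    rw [this]
    intro d hd
    have hdc : d = c := by simpa [eq_comm] using hd
    rw [hdc]
    have hn9 : c.toNat ≠ 9 := fun hn => h5 (Char.ext (UInt32.toNat_inj.mp hn))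
    have hn10 : c.toNat ≠ 10 := fun hn => h3 (Char.ext (UInt32.toNat_inj.mp hn))
    have hn13 : c.toNat ≠ 13 := fun hn => h4 (Char.ext (UInt32.toNat_inj.mp hn))
    simp only [pvDomChar, Bool.or_eq_true, Bool.and_eq_true, decide_eq_true_eq,
               beq_iff_eq] at hc
    simp only [Bool.or_eq_false_iff, decide_eq_false_iff_not, beq_eq_false_iff_ne, ne_eq]
    rcases hc with ((⟨ha, hb⟩ | h9) | h10) | h13 <;> constructor <;> omega

-- the escaped string A builds, on character lists
theorem escaped_toList (value : String) (h : pvDomStr value = true) :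
    (tomlEscapes.foldl (fun s p => PySem.Str.replace s p.1 p.2) value).toList =
      (value.toList.map pieceOf).flatMap String.toList := by
  simp only [tomlEscapes, List.foldl_cons, List.foldl_nil]
  simp only [PySem.Str.toList_replace]
  simp only [show ("\\" : String).toList = ['\\'] from rfl,
             show ("\\\\" : String).toList = ['\\', '\\'] from rfl,
             show ("\"" : String).toList = ['\"'] from rfl,
             show ("\\\"" : String).toList = ['\\', '\"'] from rfl,
             show ("\n" : String).toList = ['\n'] from rfl,
             show ("\\n" : String).toList = ['\\', 'n'] from rfl,
             show ("\r" : String).toList = ['\r'] from rfl,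
             show ("\\r" : String).toList = ['\\', 'r'] from rfl,
             show ("\t" : String).toList = ['\t'] from rfl,
             show ("\\t" : String).toList = ['\\', 't'] from rfl,
             show ("\x08" : String).toList = ['\x08'] from rfl,
             show ("\\b" : String).toList = ['\\', 'b'] from rfl,
             show ("\x0C" : String).toList = ['\x0C'] from rfl,
             show ("\\f" : String).toList = ['\\', 'f'] from rfl]
  simp only [replace_single, List.flatMap_assoc, List.flatMap_map]
  unfold pvDomStr at h
  rw [List.all_eq_true] at h
  apply List.flatMap_congr
  intro c hc
  exact composite_eq_pieceOf c (h c hc)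

-- ===== VERDICT (by name: the statement is the Claim_ definition above) =====
theorem toml_str_py_spec : Claim_equal_toml_str_py := by
  intro value hdom
  unfold Spec_toml_str_py
  have hall : value.toList.all pvDomChar = true := hdom
  have hesc := escaped_toList value hdom
  unfold toml_str_py toml_str_py_alt
  rw [foldl_tomlStep value.toList hall []]
  simp only [List.nil_append]
  have hclean : ((tomlEscapes.foldl (fun s p => PySem.Str.replace s p.1 p.2) value).toList.any
      (fun c => decide (c.toNat < 0x20) || c.toNat == 0x7F)) = false := by
    rw [hesc, List.any_eq_false]
    intro d hd
    simp only [List.mem_flatMap, List.mem_map] at hd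
    obtain ⟨s, ⟨c, hc, rfl⟩, hds⟩ := hd
    rw [List.all_eq_true] at hall
    have hcl := pieceOf_clean c (hall c hc) d hds
    simp [hcl]
  rw [hclean]
  simp only [Bool.false_eq_true, if_false]
  have hjoin : (tomlEscapes.foldl (fun s p => PySem.Str.replace s p.1 p.2) value) =
      PySem.Str.join "" (value.toList.map pieceOf) := by
    apply String.toList_inj.mp
    rw [hesc]
    simp only [PySem.Str.toList_join]
    rw [show ("" : String).toList = [] from rfl, join_nil_flatten]
    simp [List.flatMap_def, List.map_map]
  rw [hjoin]
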